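-- pv_equiv track=rewrite | github.com/llimonix/YaMusicBot | bot/utils/mc_gen.py | _calculate_text
-- ===== SOURCE A (Python) =====
-- def _calculate_text(text):
--     # Задаем вес символов
--     weight_upper = 3
--     weight_lower = 2
--     weight_space = 1
--     weight_digit = 2
--
--     max_weight = 39
--     current_weight = 0
--     result = ""
--
--     for char in text:
--         if char.isupper():
--             current_weight += weight_upper
--         elif char.islower():
--             current_weight += weight_lower
--         elif char.isspace():
--             current_weight += weight_space
--         elif char.isdigit():
--             current_weight += weight_digit
--         else:
--             current_weight += weight_lower
--
--         if current_weight > max_weight: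
--             break
--
--         result += char
--
--     if len(result) > 3 and current_weight > max_weight:
--         result = result[:-3] + "..."
--
--     return result
-- ===== SOURCE B (Python) =====
-- def _weight(char):
--     # same branch order as the original: upper=3, lower=2, space=1, digit=2, else=2
--     if char.isupper():
--         return 3
--     if char.islower():
--         return 2
--     if char.isspace():
--         return 1
--     if char.isdigit():
--         return 2
--     return 2
--
--
-- def _calculate_text(text):
--     # cumulative prefix weights, then a single cutoff index instead of a stateful break-loop
--     prefix = []
--     total = 0
--     for char in text:
--         total += _weight(char)
--         prefix.append(total)
--     cutoff = sum(1 for s in prefix if s <= 39)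
--     result = text[:cutoff]
--     if len(result) > 3 and cutoff < len(text):
--         result = result[:-3] + "..."
--     return result
-- ===== Notes on version B (the rewrite author's own statement) =====
-- stated objective: alternative
-- what changed: Replaces A's single stateful loop with break-and-mutating-accumulator by a pipeline: per-char weight helper, prefix-sum list, a cutoff computed by counting prefix sums <= 39, then one slice and the ellipsis patch.
import Mathlib
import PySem

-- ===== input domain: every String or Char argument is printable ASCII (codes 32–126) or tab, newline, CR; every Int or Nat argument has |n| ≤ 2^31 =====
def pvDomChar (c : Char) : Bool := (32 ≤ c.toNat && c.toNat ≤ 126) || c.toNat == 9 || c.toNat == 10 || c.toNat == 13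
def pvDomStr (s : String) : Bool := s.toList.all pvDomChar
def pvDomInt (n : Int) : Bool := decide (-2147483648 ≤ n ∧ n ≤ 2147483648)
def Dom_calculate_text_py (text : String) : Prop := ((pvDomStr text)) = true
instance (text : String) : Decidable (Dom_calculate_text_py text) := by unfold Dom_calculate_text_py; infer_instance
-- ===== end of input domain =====

-- B replaces A's stateful break-loop with a weight map + prefix sums + a single cutoff count (alternative decomposition, same cost).

-- ===== PORT A =====

-- the per-character weight branch ladder of A's loop body, in A's branch order
def pvWeightA (c : Char) : Int :=
  if PySem.Chars.isupper c then 3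
  else if PySem.Chars.islower c then 2
  else if PySem.Chars.isspace c then 1
  else if PySem.Chars.isdigit c then 2
  else 2

-- A's for-loop with break: state = (current_weight, result)
def pvLoopA : List Char → Int → List Char → Int × List Char
  | [], w, res => (w, res)
  | c :: rest, w, res =>
    let w' := w + pvWeightA c
    if 39 < w' then (w', res)            -- break: char not appended
    else pvLoopA rest w' (res ++ [c])

def calculate_text_py (text : String) : String :=
  let st := pvLoopA text.toList 0 []
  let res := st.2
  if 3 < res.length ∧ 39 < st.1 then
    String.ofList (PySem.List.slice res none (some (-3)) ++ "...".toList)   -- result[:-3] + "..."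
  else String.ofList res

-- ===== PORT B =====

-- Source B's _weight helper (same ladder, returned instead of accumulated)
def pvWeightB (c : Char) : Int :=
  if PySem.Chars.isupper c then 3
  else if PySem.Chars.islower c then 2
  else if PySem.Chars.isspace c then 1
  else if PySem.Chars.isdigit c then 2
  else 2

def calculate_text_py_alt (text : String) : String :=
  let cs := text.toList
  -- prefix = running totals of the weights
  let prefixes := (cs.foldl (fun (st : Int × List Int) c =>
      let t := st.1 + pvWeightB c
      (t, st.2 ++ [t])) ((0 : Int), ([] : List Int))).2
  -- sum(1 for s in prefix if s <= 39) = number of prefix sums ≤ 39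
  let cutoff := prefixes.countP (fun s => s ≤ 39)
  let res := PySem.List.slice cs none (some (cutoff : Int))            -- text[:cutoff]
  let res := if 3 < res.length ∧ cutoff < cs.length then
      PySem.List.slice res none (some (-3)) ++ "...".toList else res   -- result[:-3] + "..."
  String.ofList res

-- ===== PRECONDITION & SPEC =====
def Spec_calculate_text_py (text : String) (out : String) : Prop := out = calculate_text_py_alt text
instance (text : String) (out : String) : Decidable (Spec_calculate_text_py text out) := by unfold Spec_calculate_text_py; infer_instance

-- ===== CLAIM (what is proved, stated in full; the proofs are below) =====
def Claim_equal_calculate_text_py : Prop := ∀ (text : String), Dom_calculate_text_py text → Spec_calculate_text_py text (calculate_text_py text)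

-- ===== LEMMAS AND PROOFS =====

-- the sequence of prefix sums starting from w
def pvScan (w : Int) : List Char → List Int
  | [] => []
  | c :: rest => (w + pvWeightA c) :: pvScan (w + pvWeightA c) rest

theorem pvWeightA_pos (c : Char) : 1 ≤ pvWeightA c := by
  unfold pvWeightA; split_ifs <;> norm_num

theorem pvScan_gt (w : Int) (cs : List Char) : ∀ s ∈ pvScan w cs, w < s := by
  induction cs generalizing w with
  | nil => simp [pvScan]
  | cons c rest ih =>
    intro s hs
    simp only [pvScan, List.mem_cons] at hs
    have hc := pvWeightA_pos c
    rcases hs with h | h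
    · omega
    · have := ih (w + pvWeightA c) s h; omega

-- A's break-loop, characterised by B's cutoff count over the prefix sums
theorem pvLoopA_spec (cs : List Char) (w : Int) (res : List Char) (hw : w ≤ 39) :
    (pvLoopA cs w res).2 = res ++ cs.take ((pvScan w cs).countP (fun s => decide (s ≤ 39))) ∧
    (39 < (pvLoopA cs w res).1 ↔ (pvScan w cs).countP (fun s => decide (s ≤ 39)) < cs.length) := by
  induction cs generalizing w res with
  | nil => simp [pvLoopA, pvScan]; omega
  | cons c rest ih =>
    simp only [pvLoopA, pvScan]
    by_cases h : 39 < w + pvWeightA c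
    · have hcount : (pvScan (w + pvWeightA c) rest).countP (fun s => decide (s ≤ 39)) = 0 := by
        rw [List.countP_eq_zero]
        intro s hs
        have := pvScan_gt (w + pvWeightA c) rest s hs
        simp; omega
      rw [if_pos h]
      refine ⟨?_, ?_⟩ <;>
        simp [hcount, h, show ¬ (w + pvWeightA c ≤ 39) by omega]
    · rw [if_neg h]
      have h' : w + pvWeightA c ≤ 39 := le_of_not_gt h
      obtain ⟨ih1, ih2⟩ := ih (w + pvWeightA c) (res ++ [c]) h'
      refine ⟨?_, ?_⟩
      · rw [ih1]; simp [h']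
      · simp only [List.countP_cons, decide_eq_true_eq, if_pos h', List.length_cons]
        rw [ih2]; omega

-- B's fold produces the prefix-sum list pvScan (pvWeightB c = pvWeightA c by rfl)
theorem pvFold_scan (cs : List Char) (t : Int) (acc : List Int) :
    (cs.foldl (fun (st : Int × List Int) c =>
      let t := st.1 + pvWeightB c
      (t, st.2 ++ [t])) (t, acc)).2 = acc ++ pvScan t cs := by
  induction cs generalizing t acc with
  | nil => simp [pvScan]
  | cons c rest ih =>
    have hw : pvWeightB c = pvWeightA c := rfl
    simp [List.foldl_cons, pvScan, ih, hw]

-- ===== VERDICT (by name: the statement is the Claim_ definition above) =====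
theorem calculate_text_py_spec : Claim_equal_calculate_text_py := by
  intro text _
  unfold Spec_calculate_text_py calculate_text_py calculate_text_py_alt
  have hfold := pvFold_scan text.toList 0 []
  have hloop := pvLoopA_spec text.toList 0 [] (by norm_num)
  simp only [List.nil_append] at hfold hloop
  simp only [hfold, hloop.1, PySem.List.slice_to_natCast]
  by_cases hc : 3 < (List.take ((pvScan 0 text.toList).countP (fun s => decide (s ≤ 39)))
        text.toList).length ∧
      (pvScan 0 text.toList).countP (fun s => decide (s ≤ 39)) < text.toList.length
  · rw [if_pos ⟨hc.1, hloop.2.mpr hc.2⟩, if_pos hc]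
  · rw [if_neg (fun hh => hc ⟨hh.1, hloop.2.mp hh.2⟩), if_neg hc]
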